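-- pv_equiv track=rewrite | github.com/pm4py/pm4py-core | pm4py/algo/discovery/inductive/variants/im_clean/utils.py | msdw
-- ===== SOURCE A (Python) =====
-- import itertools
--
-- def get_alphabet(cl):
--     return set(itertools.chain(*cl))
--
-- def msdw(cl, msd):
--     witnesses = dict()
--     alphabet = get_alphabet(cl)
--     for a in alphabet:
--         if a in msd and msd[a] > 0:
--             witnesses[a] = set()
--         else:
--             continue
--         for t in cl:
--             if len(list(filter(lambda e: e == a, t))) > 1:
--                 indices = [i for i, x in enumerate(t) if x == a]
--                 for i in range(len(indices) - 1):
--                     if indices[i + 1] - indices[i] - 1 == msd[a]: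
--                         for b in t[indices[i] + 1:indices[i + 1]]:
--                             witnesses[a].add(b)
--     return witnesses
-- ===== SOURCE B (Python) =====
-- def msdw(cl, msd):
--     # qualifying symbols, in first-occurrence order over the traces
--     witnesses = {}
--     for t in cl:
--         for x in t:
--             if x not in witnesses and x in msd and msd[x] > 0:
--                 witnesses[x] = set()
--     # one pass per trace: index positions of every symbol, then only qualifying ones
--     for t in cl:
--         pos = {}
--         for i, x in enumerate(t):
--             pos.setdefault(x, []).append(i)
--         for a, idx in pos.items():
--             if a in witnesses and len(idx) > 1:
--                 d = msd[a]
--                 for i, j in zip(idx, idx[1:]):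
--                     if j - i - 1 == d:
--                         witnesses[a].update(t[i + 1:j])
--     return witnesses
-- ===== Notes on version B (the rewrite author's own statement) =====
-- stated objective: faster
-- what changed: A rescans every trace once per alphabet symbol (count filter, enumerate comprehension, index-range loop); B makes one indexing pass per trace building a per-symbol position dict, then processes only the symbols actually occurring in that trace.
import Mathlib
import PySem

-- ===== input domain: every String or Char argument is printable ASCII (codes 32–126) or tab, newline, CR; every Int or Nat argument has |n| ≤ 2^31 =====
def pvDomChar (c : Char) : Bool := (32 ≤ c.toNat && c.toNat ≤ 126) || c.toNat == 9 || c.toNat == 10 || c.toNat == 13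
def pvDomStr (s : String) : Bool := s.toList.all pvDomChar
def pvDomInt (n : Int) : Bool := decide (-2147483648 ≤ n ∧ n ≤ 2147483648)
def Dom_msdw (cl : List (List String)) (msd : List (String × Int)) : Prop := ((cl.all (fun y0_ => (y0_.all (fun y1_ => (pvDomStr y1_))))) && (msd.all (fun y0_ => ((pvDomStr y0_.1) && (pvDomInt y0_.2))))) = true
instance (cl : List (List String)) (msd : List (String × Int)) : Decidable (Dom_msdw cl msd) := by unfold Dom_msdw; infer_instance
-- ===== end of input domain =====

-- B re-traverses the data trace-major (one indexing pass per trace) instead of A's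
-- alphabet-major rescans; equality of the returned dict is proved for all inputs.

-- ===== PORT A =====
-- set(itertools.chain(*cl))
def getAlphabet (cl : List (List String)) : PySem.Set String :=
  PySem.Set.ofList cl.flatten

-- indices = [i for i, x in enumerate(t) if x == a]
def idxI (a : String) (t : List String) : List Int :=
  ((PySem.List.enumerate t 0).filter (fun p => p.2 == a)).map (fun p => p.1)

-- body of A's inner 'for t in cl' loop (for a fixed alphabet symbol a with msd[a] = d)
def aInner (a : String) (d : Int) (w : PySem.Dict String (PySem.Set String)) (t : List String) :
    PySem.Dict String (PySem.Set String) :=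
  if (t.filter (fun e => e == a)).length > 1 then
    let indices : List Int := idxI a t
    (PySem.List.pyRange 0 ((indices.length : Int) - 1) 1).foldl (fun w i =>
      if PySem.List.pyGetD indices (i + 1) 0 - PySem.List.pyGetD indices i 0 - 1 == d then
        (PySem.List.slice t (some (PySem.List.pyGetD indices i 0 + 1))
            (some (PySem.List.pyGetD indices (i + 1) 0))).foldl
          (fun w b => w.modify a PySem.Set.empty (fun s => PySem.Set.add s b)) w
      else w) w
  else w

-- body of A's outer 'for a in alphabet' loop
def aStep (msdD : PySem.Dict String Int) (cl : List (List String))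
    (w : PySem.Dict String (PySem.Set String)) (a : String) :
    PySem.Dict String (PySem.Set String) :=
  match msdD.get? a with
  | none => w
  | some d =>
    if d > 0 then cl.foldl (aInner a d) (w.insert a PySem.Set.empty) else w

def msdw (cl : List (List String)) (msd : List (String × Int)) : List (String × List String) :=
  let msdD : PySem.Dict String Int := PySem.Dict.ofList msd
  ((getAlphabet cl).foldl (aStep msdD cl) PySem.Dict.empty).items

-- ===== PORT B =====
-- first loop of B: collect the qualifying symbols, first occurrence first
def bKeyStep (msdD : PySem.Dict String Int) (w : PySem.Dict String (PySem.Set String))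
    (x : String) : PySem.Dict String (PySem.Set String) :=
  if w.contains x then w
  else match msdD.get? x with
    | some d => if d > 0 then w.insert x PySem.Set.empty else w
    | none => w

-- pos = {}; for i, x in enumerate(t): pos.setdefault(x, []).append(i)
def bPos (t : List String) : PySem.Dict String (List Int) :=
  (PySem.List.enumerate t 0).foldl (fun p q => p.modify q.2 [] (fun l => l ++ [q.1]))
    PySem.Dict.empty

-- for i, j in zip(idx, idx[1:]): if j - i - 1 == d: witnesses[a].update(t[i+1:j])
def bPairStep (t : List String) (a : String) (d : Int)
    (w : PySem.Dict String (PySem.Set String)) (ij : Int × Int) :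
    PySem.Dict String (PySem.Set String) :=
  if ij.2 - ij.1 - 1 == d then
    w.modify a PySem.Set.empty
      (fun s => PySem.Set.update s (PySem.List.slice t (some (ij.1 + 1)) (some ij.2)))
  else w

-- for a, idx in pos.items(): ...
def bItemStep (msdD : PySem.Dict String Int) (t : List String)
    (w : PySem.Dict String (PySem.Set String)) (ai : String × List Int) :
    PySem.Dict String (PySem.Set String) :=
  if w.contains ai.1 && decide (ai.2.length > 1) then
    match msdD.get? ai.1 with
    | some d =>
      (ai.2.zip (PySem.List.slice ai.2 (some 1) none)).foldl (bPairStep t ai.1 d) w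
    | none => w
  else w

-- body of B's second 'for t in cl' loop
def bTraceStep (msdD : PySem.Dict String Int) (w : PySem.Dict String (PySem.Set String))
    (t : List String) : PySem.Dict String (PySem.Set String) :=
  (bPos t).items.foldl (bItemStep msdD t) w

def msdw_alt (cl : List (List String)) (msd : List (String × Int)) : List (String × List String) :=
  let msdD : PySem.Dict String Int := PySem.Dict.ofList msd
  let init : PySem.Dict String (PySem.Set String) :=
    cl.foldl (fun w t => t.foldl (bKeyStep msdD) w) PySem.Dict.empty
  (cl.foldl (bTraceStep msdD) init).items

-- ===== PRECONDITION & SPEC =====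
def Spec_msdw (cl : List (List String)) (msd : List (String × Int)) (out : List (String × List String)) : Prop := out = msdw_alt cl msd
instance (cl : List (List String)) (msd : List (String × Int)) (out : List (String × List String)) : Decidable (Spec_msdw cl msd out) := by unfold Spec_msdw; infer_instance

-- ===== CLAIM (what is proved, stated in full; the proofs are below) =====
def Claim_equal_msdw : Prop := ∀ (cl : List (List String)) (msd : List (String × Int)), Dom_msdw cl msd → Spec_msdw cl msd (msdw cl msd)

-- ===== LEMMAS AND PROOFS =====

-- does a qualify ('a in msd and msd[a] > 0')?
def mCond (msdD : PySem.Dict String Int) (x : String) : Bool :=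
  match msdD.get? x with
  | some d => decide (d > 0)
  | none => false

-- set-level value of one trace's contribution, consecutive-pair (zip) formulation
def gapFold (t : List String) (d : Int) (s : PySem.Set String) (P : List Int) : PySem.Set String :=
  (P.zip P.tail).foldl (fun s ij =>
    if ij.2 - ij.1 - 1 == d then
      PySem.Set.update s (PySem.List.slice t (some (ij.1 + 1)) (some ij.2))
    else s) s

-- set-level value of A's per-trace body
def aTrace (a : String) (d : Int) (s : PySem.Set String) (t : List String) : PySem.Set String :=
  if (t.filter (fun e => e == a)).length > 1 then
    (PySem.List.pyRange 0 (((idxI a t).length : Int) - 1) 1).foldl (fun s i =>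
      if PySem.List.pyGetD (idxI a t) (i + 1) 0 - PySem.List.pyGetD (idxI a t) i 0 - 1 == d then
        (PySem.List.slice t (some (PySem.List.pyGetD (idxI a t) i 0 + 1))
            (some (PySem.List.pyGetD (idxI a t) (i + 1) 0))).foldl
          (fun s b => PySem.Set.add s b) s
      else s) s
  else s

-- set-level value of B's per-trace contribution to key a (c = 'a in witnesses')
def bVal (msdD : PySem.Dict String Int) (a : String) (t : List String) (c : Bool)
    (s : PySem.Set String) : PySem.Set String :=
  if c && decide ((idxI a t).length > 1) then
    match msdD.get? a with
    | some d => gapFold t d s (idxI a t)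
    | none => s
  else s

def bTrace (msdD : PySem.Dict String Int) (a : String) (c : Bool) (s : PySem.Set String)
    (t : List String) : PySem.Set String :=
  if a ∈ t then bVal msdD a t c s else s

-- the key list both programs produce
def keyList (msdD : PySem.Dict String Int) (cl : List (List String)) : List String :=
  (PySem.Set.ofList cl.flatten).filter (mCond msdD)

-- ---------- generic dict lemmas ----------
theorem dict_contains_iff {ν : Type} (d : PySem.Dict String ν) (k : String) :
    d.contains k = decide (k ∈ d.keys) := by
  rcases d with ⟨items⟩
  simp only [PySem.Dict.contains, PySem.Dict.keys]
  rw [Bool.eq_iff_iff]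
  simp only [List.any_eq_true, beq_iff_eq, decide_eq_true_eq, List.mem_map]

theorem dict_modify_tail {ν : Type} (pre : List (String × ν)) (a : String) (s : ν) (d0 : ν)
    (f : ν → ν) (hpre : ∀ p ∈ pre, (p.1 == a) = false) :
    PySem.Dict.modify ⟨pre ++ [(a, s)]⟩ a d0 f = ⟨pre ++ [(a, f s)]⟩ := by
  have hfind : List.find? (fun p => p.1 == a) pre = none :=
    List.find?_eq_none.mpr (by intro p hp; simp [hpre p hp])
  have hcont : (PySem.Dict.mk (pre ++ [(a, s)]) : PySem.Dict String ν).contains a = true := by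
    simp [PySem.Dict.contains, List.any_append]
  simp only [PySem.Dict.modify, PySem.Dict.getD, PySem.Dict.get?,
    PySem.Dict.insert, hcont, if_pos, List.find?_append, hfind]
  simp only [List.find?_cons, beq_self_eq_true, List.map_append]
  simp only [Option.none_or, Option.map_some, Option.getD_some]
  have h2 : List.map (fun p => if (p.1 == a) = true then (a, f s) else p) pre
      = List.map id pre := List.map_congr_left (fun p hp => by simp [hpre p hp])
  congr 1
  rw [h2, List.map_id]
  simp

theorem dict_insert_fresh {ν : Type} (w : PySem.Dict String ν) (a : String) (v : ν)
    (h : ∀ p ∈ w.items, (p.1 == a) = false) :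
    w.insert a v = ⟨w.items ++ [(a, v)]⟩ := by
  have hcont : w.contains a = false := by
    simp only [PySem.Dict.contains, List.any_eq_false]
    intro p hp; simp [h p hp]
  simp [PySem.Dict.insert, hcont]

theorem foldl_local {β : Type} (a : String) (step : PySem.Dict String (PySem.Set String) → β → PySem.Dict String (PySem.Set String))
    (F : β → PySem.Set String → PySem.Set String)
    (h : ∀ (b : β) (pre : List (String × PySem.Set String)) (s : PySem.Set String),
      (∀ p ∈ pre, (p.1 == a) = false) → step ⟨pre ++ [(a, s)]⟩ b = ⟨pre ++ [(a, F b s)]⟩)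
    (l : List β) : ∀ (pre : List (String × PySem.Set String)) (s : PySem.Set String),
    (∀ p ∈ pre, (p.1 == a) = false) →
    l.foldl step ⟨pre ++ [(a, s)]⟩ = ⟨pre ++ [(a, l.foldl (fun s b => F b s) s)]⟩ := by
  induction l with
  | nil => intro pre s hpre; rfl
  | cons b l ih =>
    intro pre s hpre
    simp only [List.foldl_cons, h b pre s hpre]
    exact ih pre (F b s) hpre

theorem getD_of_items_map (K : List String) (f : String → PySem.Set String) (a : String)
    (ha : a ∈ K) (hnd : K.Nodup) :
    (PySem.Dict.mk (K.map (fun x => (x, f x)))).getD a [] = f a := by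
  induction K with
  | nil => cases ha
  | cons x K ih =>
    rcases List.mem_cons.mp ha with h | h
    · subst h
      simp [PySem.Dict.getD, PySem.Dict.get?]
    · have hxa : (x == a) = false := beq_eq_false_iff_ne.mpr (by
        rintro rfl; exact (List.nodup_cons.mp hnd).1 h)
      have := ih h (List.nodup_cons.mp hnd).2
      simpa [PySem.Dict.getD, PySem.Dict.get?, List.find?_cons, hxa] using this

-- ---------- A-side extraction ----------
theorem aInner_local (a : String) (d : Int) (t : List String)
    (pre : List (String × PySem.Set String)) (s : PySem.Set String)
    (hpre : ∀ p ∈ pre, (p.1 == a) = false) :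
    aInner a d ⟨pre ++ [(a, s)]⟩ t = ⟨pre ++ [(a, aTrace a d s t)]⟩ := by
  unfold aInner aTrace
  by_cases h : (t.filter (fun e => e == a)).length > 1
  · rw [if_pos h, if_pos h]
    exact foldl_local a _
      (fun i s =>
        if PySem.List.pyGetD (idxI a t) (i + 1) 0 - PySem.List.pyGetD (idxI a t) i 0 - 1 == d then
          (PySem.List.slice t (some (PySem.List.pyGetD (idxI a t) i 0 + 1))
              (some (PySem.List.pyGetD (idxI a t) (i + 1) 0))).foldl
            (fun s b => PySem.Set.add s b) s
        else s)
      (by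
        intro i pre' s' hpre'
        dsimp only
        split_ifs with hc
        · exact foldl_local a _ (fun b s => PySem.Set.add s b)
            (fun b pre'' s'' hpre'' => dict_modify_tail pre'' a s'' _ _ hpre'') _ pre' s' hpre'
        · rfl)
      _ pre s hpre
  · rw [if_neg h, if_neg h]

theorem A_main (msdD : PySem.Dict String Int) (cl : List (List String)) :
    ∀ (L : List String) (pre : List (String × PySem.Set String)), L.Nodup →
    (∀ p ∈ pre, p.1 ∉ L) →
    (L.foldl (aStep msdD cl) ⟨pre⟩).items =
      pre ++ (L.filter (mCond msdD)).map (fun a =>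
        (a, cl.foldl (fun s t => aTrace a (msdD.getD a 0) s t) PySem.Set.empty)) := by
  intro L
  induction L with
  | nil => intro pre _ _; simp
  | cons a L ih =>
    intro pre hnd hpre
    have hndL : L.Nodup := (List.nodup_cons.mp hnd).2
    have haL : a ∉ L := (List.nodup_cons.mp hnd).1
    simp only [List.foldl_cons]
    rcases hg : msdD.get? a with _ | d
    · have hm : mCond msdD a = false := by simp [mCond, hg]
      have hstep : aStep msdD cl ⟨pre⟩ a = ⟨pre⟩ := by simp [aStep, hg]
      rw [hstep, ih pre hndL (fun p hp => fun hL => hpre p hp (List.mem_cons_of_mem _ hL)),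
        List.filter_cons_of_neg (by simp [hm])]
    · by_cases hd : d > 0
      · have hm : mCond msdD a = true := by simp [mCond, hg, hd]
        have hgd : msdD.getD a 0 = d := by simp [PySem.Dict.getD, hg]
        have hfresh : ∀ p ∈ (PySem.Dict.mk pre : PySem.Dict String (PySem.Set String)).items,
            (p.1 == a) = false := by
          intro p hp
          exact beq_eq_false_iff_ne.mpr (fun h => hpre p hp (h ▸ List.mem_cons_self))
        have hstep : aStep msdD cl ⟨pre⟩ a =
            ⟨pre ++ [(a, cl.foldl (fun s t => aTrace a d s t) PySem.Set.empty)]⟩ := by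
          simp only [aStep, hg, if_pos hd]
          rw [dict_insert_fresh _ a _ hfresh]
          exact foldl_local a _ (fun t s => aTrace a d s t)
            (fun t pre' s' hpre' => aInner_local a d t pre' s' hpre') cl pre
            PySem.Set.empty hfresh
        rw [hstep, ih _ hndL (by
          intro p hp
          rcases List.mem_append.mp hp with h | h
          · exact fun hL => hpre p h (List.mem_cons_of_mem _ hL)
          · simp at h; rw [show p.1 = a from by rw [h]]; exact haL),
          List.filter_cons_of_pos (by simp [hm])]
        simp [hgd]
      · have hm : mCond msdD a = false := by simp [mCond, hg, hd]
        have hstep : aStep msdD cl ⟨pre⟩ a = ⟨pre⟩ := by simp [aStep, hg, hd]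
        rw [hstep, ih pre hndL (fun p hp => fun hL => hpre p hp (List.mem_cons_of_mem _ hL)),
          List.filter_cons_of_neg (by simp [hm])]

theorem msdw_eq (cl : List (List String)) (msd : List (String × Int)) :
    msdw cl msd = (keyList (PySem.Dict.ofList msd) cl).map (fun a =>
      (a, cl.foldl (fun s t => aTrace a ((PySem.Dict.ofList msd).getD a 0) s t) PySem.Set.empty)) := by
  have h := A_main (PySem.Dict.ofList msd) cl (getAlphabet cl) [] (PySem.Set.nodup_ofList _)
    (by intro p hp; cases hp)
  simpa [msdw, keyList, getAlphabet] using h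

-- ---------- B-side: keys / init ----------
theorem ofList_filter (p : String → Bool) (l : List String) :
    PySem.Set.ofList (l.filter p) = (PySem.Set.ofList l).filter p := by
  induction l using List.reverseRecOn with
  | nil => rfl
  | append_singleton l x ih =>
    rw [PySem.Set.ofList_append_singleton, List.filter_append]
    cases hp : p x
    · simp only [List.filter_cons, hp, Bool.false_eq_true, if_false, List.filter_nil,
        List.append_nil]
      unfold PySem.Set.add
      split
      · exact ih
      · rw [List.filter_append]
        simp only [List.filter_cons, hp, Bool.false_eq_true, if_false, List.filter_nil,
          List.append_nil]
        exact ih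
    · simp only [List.filter_cons, hp, if_true, List.filter_nil]
      rw [PySem.Set.ofList_append_singleton, ih]
      unfold PySem.Set.add
      by_cases hc : (PySem.Set.ofList l).contains x
      · rw [if_pos hc, if_pos (by
          rw [PySem.Set.contains_iff] at hc ⊢
          exact List.mem_filter.mpr ⟨hc, hp⟩)]
      · rw [if_neg hc, if_neg (by
          rw [PySem.Set.contains_iff] at hc ⊢
          exact fun hm => hc (List.mem_of_mem_filter hm)), List.filter_append]
        simp only [List.filter_cons, hp, if_true, List.filter_nil]

theorem bKey_fold_keys (msdD : PySem.Dict String Int) :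
    ∀ (l : List String) (w : PySem.Dict String (PySem.Set String)),
    (l.foldl (bKeyStep msdD) w).keys = PySem.Set.update w.keys (l.filter (mCond msdD)) := by
  intro l
  induction l with
  | nil => intro w; rfl
  | cons x xs ih =>
    intro w
    simp only [List.foldl_cons, List.filter_cons]
    by_cases hc : w.contains x
    · have hstep : bKeyStep msdD w x = w := by simp [bKeyStep, hc]
      have hmem : (w.keys).contains x = true := by
        rw [dict_contains_iff] at hc; simpa [List.contains_iff_mem] using hc
      cases hm : mCond msdD x
      · simp only [Bool.false_eq_true, if_false, hstep, ih]
      · simp only [if_true, hstep, ih, PySem.Set.update_cons]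
        congr 1
        unfold PySem.Set.add
        rw [if_pos (by simpa [PySem.Set.contains] using hmem)]
    · have hc' : w.contains x = false := by simpa using hc
      have hmem : (w.keys).contains x = false := by
        rw [dict_contains_iff] at hc'
        simpa [List.contains_iff_mem] using hc' 
      rcases hg : msdD.get? x with _ | d
      · have hm : mCond msdD x = false := by simp [mCond, hg]
        have hstep : bKeyStep msdD w x = w := by simp [bKeyStep, hc, hg]
        simp only [hm, Bool.false_eq_true, if_false, hstep, ih]
      · by_cases hd : d > 0
        · have hm : mCond msdD x = true := by simp [mCond, hg, hd]
          have hstep : bKeyStep msdD w x = w.insert x PySem.Set.empty := by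
            simp [bKeyStep, hc, hg, hd]
          rw [hm, if_pos rfl, hstep, ih, PySem.Set.update_cons,
            PySem.Dict.keys_insert_of_not_contains _ _ hc']
          congr 1
          unfold PySem.Set.add
          rw [if_neg (by simpa [PySem.Set.contains] using hmem)]
        · have hm : mCond msdD x = false := by simp [mCond, hg, hd]
          have hstep : bKeyStep msdD w x = w := by simp [bKeyStep, hc, hg, hd]
          simp only [hm, Bool.false_eq_true, if_false, hstep, ih]

theorem bKey_fold_vals (msdD : PySem.Dict String Int) :
    ∀ (l : List String) (w : PySem.Dict String (PySem.Set String)),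
    (∀ p ∈ w.items, p.2 = ([] : List String)) →
    ∀ p ∈ (l.foldl (bKeyStep msdD) w).items, p.2 = ([] : List String) := by
  intro l
  induction l with
  | nil => intro w h; exact h
  | cons x xs ih =>
    intro w hw
    simp only [List.foldl_cons]
    apply ih
    intro p hp
    unfold bKeyStep at hp
    split at hp
    · exact hw p hp
    · split at hp
      · split at hp
        · simp only [PySem.Dict.insert] at hp
          split at hp
          · simp only [PySem.Dict.items, List.mem_map] at hp
            rcases hp with ⟨q, hq, rfl⟩
            split
            · rfl
            · exact hw q hq
          · simp only [List.mem_append] at hp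
            rcases hp with h | h
            · exact hw p h
            · simp at h; rw [h]
        · exact hw p hp
      · exact hw p hp

theorem init_keys (msdD : PySem.Dict String Int) (cl : List (List String)) :
    (cl.foldl (fun w t => t.foldl (bKeyStep msdD) w) PySem.Dict.empty).keys = keyList msdD cl := by
  have gen : ∀ (cl' : List (List String)) (w : PySem.Dict String (PySem.Set String)),
      (cl'.foldl (fun w t => t.foldl (bKeyStep msdD) w) w).keys =
        PySem.Set.update w.keys (cl'.flatten.filter (mCond msdD)) := by
    intro cl'
    induction cl' with
    | nil => intro w; rfl
    | cons t cl' ih =>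
      intro w
      simp only [List.foldl_cons, ih, bKey_fold_keys, List.flatten_cons, List.filter_append,
        PySem.Set.update_append]
  rw [gen]
  show PySem.Set.update PySem.Set.empty _ = _
  rw [PySem.Set.update_empty, ofList_filter]
  rfl

theorem init_items (msdD : PySem.Dict String Int) (cl : List (List String)) :
    (cl.foldl (fun w t => t.foldl (bKeyStep msdD) w) PySem.Dict.empty).items =
      (keyList msdD cl).map (fun a => (a, ([] : List String))) := by
  have hk := init_keys msdD cl
  have hnd : (cl.foldl (fun w t => t.foldl (bKeyStep msdD) w) PySem.Dict.empty).keys.Nodup := by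
    rw [hk]; exact (PySem.Set.nodup_ofList _).filter _
  have hvals : ∀ p ∈ (cl.foldl (fun w t => t.foldl (bKeyStep msdD) w) PySem.Dict.empty).items,
      p.2 = ([] : List String) := by
    have gen : ∀ (cl' : List (List String)) (w : PySem.Dict String (PySem.Set String)),
        (∀ p ∈ w.items, p.2 = ([] : List String)) →
        ∀ p ∈ (cl'.foldl (fun w t => t.foldl (bKeyStep msdD) w) w).items,
          p.2 = ([] : List String) := by
      intro cl'
      induction cl' with
      | nil => intro w hw; exact hw
      | cons t cl' ih =>
        intro w hw
        exact ih _ (bKey_fold_vals msdD t w hw)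
    exact gen cl PySem.Dict.empty (by intro p hp; cases hp)
  rw [PySem.Dict.items_eq_map_keys _ hnd ([] : List String), hk]
  apply List.map_congr_left
  intro a _
  congr 1
  rcases hf : (cl.foldl (fun w t => t.foldl (bKeyStep msdD) w) PySem.Dict.empty).get? a with _ | v
  · simp [PySem.Dict.getD, hf]
  · have hv : v = [] := by
      simp only [PySem.Dict.get?] at hf
      rcases hmap : List.find? (fun p => p.1 == a)
          (cl.foldl (fun w t => t.foldl (bKeyStep msdD) w) PySem.Dict.empty).items with _ | q
      · rw [hmap] at hf; cases hf
      · rw [hmap] at hf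
        simp only [Option.map_some, Option.some.injEq] at hf
        rw [← hf]
        exact hvals q (List.mem_of_find?_eq_some hmap)
    simp [PySem.Dict.getD, hf, hv]

-- ---------- B-side: the per-trace position dict ----------
theorem pos_keys (t : List String) : (bPos t).keys = PySem.Set.ofList t := by
  unfold bPos
  rw [PySem.Dict.keys_foldl_modify_key (PySem.List.enumerate t 0) (fun q => q.2) []
    (fun _ q => fun l => l ++ [q.1]) PySem.Dict.empty]
  show PySem.Set.update PySem.Set.empty _ = _
  rw [PySem.Set.update_empty, PySem.List.map_snd_enumerate]

theorem pos_getD (t : List String) (a : String) : (bPos t).getD a [] = idxI a t := by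
  unfold bPos
  rw [show (PySem.List.enumerate t 0).foldl
        (fun p q => p.modify q.2 [] (fun l => l ++ [q.1])) PySem.Dict.empty
      = ((PySem.List.enumerate t 0).map (fun q => (q.2, q.1))).foldl
        (fun p q => p.modify q.1 [] (fun l => l ++ [q.2])) PySem.Dict.empty from
      (List.foldl_map (f := fun q : Int × String => (q.2, q.1))
        (g := fun (p : PySem.Dict String (List Int)) (q : String × Int) =>
          p.modify q.1 [] (fun l => l ++ [q.2]))
        (l := PySem.List.enumerate t 0) (init := PySem.Dict.empty)).symm]
  rw [PySem.Dict.getD_foldl_modify_append]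
  simp only [List.filter_map, List.map_map]
  unfold idxI
  simp [Function.comp_def]

theorem pos_items (t : List String) :
    (bPos t).items = (PySem.Set.ofList t).map (fun x => (x, idxI x t)) := by
  have hnd : (bPos t).keys.Nodup := by rw [pos_keys]; exact PySem.Set.nodup_ofList _
  rw [PySem.Dict.items_eq_map_keys _ hnd ([] : List Int), pos_keys]
  exact List.map_congr_left (fun x _ => by rw [pos_getD])

-- ---------- B-side: second loop, contains/keys invariance and getD extraction ----------
theorem pairfold_contains (t : List String) (a : String) (d : Int) :
    ∀ (l : List (Int × Int)) (w : PySem.Dict String (PySem.Set String)),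
    w.contains a = true → ∀ x, (l.foldl (bPairStep t a d) w).contains x = w.contains x := by
  intro l
  induction l with
  | nil => intro w _ x; rfl
  | cons ij l ih =>
    intro w hc x
    simp only [List.foldl_cons]
    by_cases hij : (ij.2 - ij.1 - 1 == d) = true
    · rw [show bPairStep t a d w ij = w.modify a PySem.Set.empty
          (fun s => PySem.Set.update s (PySem.List.slice t (some (ij.1 + 1)) (some ij.2))) from by
        simp [bPairStep, hij]]
      have hc' : (w.modify a PySem.Set.empty
          (fun s => PySem.Set.update s (PySem.List.slice t (some (ij.1 + 1)) (some ij.2)))).contains a = true := by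
        rw [PySem.Dict.contains_modify]; simp
      rw [ih _ hc' x, PySem.Dict.contains_modify]
      cases hxa : x == a
      · simp
      · simp only [Bool.true_or]
        rw [(by exact beq_iff_eq.mp hxa : x = a), hc]
    · rw [show bPairStep t a d w ij = w from by simp [bPairStep, hij]]
      exact ih w hc x

theorem pairfold_keys (t : List String) (a : String) (d : Int) :
    ∀ (l : List (Int × Int)) (w : PySem.Dict String (PySem.Set String)),
    w.contains a = true → (l.foldl (bPairStep t a d) w).keys = w.keys := by
  intro l
  induction l with
  | nil => intro w _; rfl
  | cons ij l ih =>
    intro w hc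
    simp only [List.foldl_cons]
    by_cases hij : (ij.2 - ij.1 - 1 == d) = true
    · rw [show bPairStep t a d w ij = w.modify a PySem.Set.empty
          (fun s => PySem.Set.update s (PySem.List.slice t (some (ij.1 + 1)) (some ij.2))) from by
        simp [bPairStep, hij]]
      rw [ih _ (by rw [PySem.Dict.contains_modify]; simp), PySem.Dict.keys_modify,
        PySem.Dict.keys_insert_of_contains _ _ hc]
    · rw [show bPairStep t a d w ij = w from by simp [bPairStep, hij]]
      exact ih w hc

theorem pairfold_getD (t : List String) (a : String) (d : Int) :
    ∀ (l : List (Int × Int)) (w : PySem.Dict String (PySem.Set String)),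
    (l.foldl (bPairStep t a d) w).getD a [] =
      l.foldl (fun s ij =>
        if ij.2 - ij.1 - 1 == d then
          PySem.Set.update s (PySem.List.slice t (some (ij.1 + 1)) (some ij.2))
        else s) (w.getD a []) := by
  intro l
  induction l with
  | nil => intro w; rfl
  | cons ij l ih =>
    intro w
    simp only [List.foldl_cons]
    by_cases hij : (ij.2 - ij.1 - 1 == d) = true
    · rw [show bPairStep t a d w ij = w.modify a PySem.Set.empty
          (fun s => PySem.Set.update s (PySem.List.slice t (some (ij.1 + 1)) (some ij.2))) from by
        simp [bPairStep, hij]]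
      rw [ih]
      simp only [if_pos hij]
      congr 1
      exact PySem.Dict.getD_modify_self w a PySem.Set.empty _
    · rw [show bPairStep t a d w ij = w from by simp [bPairStep, hij]]
      rw [ih]
      simp only [if_neg hij]

theorem pairfold_getD_ne (t : List String) (a x : String) (d : Int) (hx : x ≠ a) :
    ∀ (l : List (Int × Int)) (w : PySem.Dict String (PySem.Set String)),
    (l.foldl (bPairStep t a d) w).getD x [] = w.getD x [] := by
  intro l
  induction l with
  | nil => intro w; rfl
  | cons ij l ih =>
    intro w
    simp only [List.foldl_cons]
    by_cases hij : (ij.2 - ij.1 - 1 == d) = true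
    · rw [show bPairStep t a d w ij = w.modify a PySem.Set.empty
          (fun s => PySem.Set.update s (PySem.List.slice t (some (ij.1 + 1)) (some ij.2))) from by
        simp [bPairStep, hij]]
      rw [ih]
      exact PySem.Dict.getD_modify_of_ne w ([] : List String) _ hx
    · rw [show bPairStep t a d w ij = w from by simp [bPairStep, hij]]
      exact ih w

theorem itemStep_contains (msdD : PySem.Dict String Int) (t : List String)
    (w : PySem.Dict String (PySem.Set String)) (ai : String × List Int) (x : String) :
    (bItemStep msdD t w ai).contains x = w.contains x := by
  unfold bItemStep
  by_cases hg : (w.contains ai.1 && decide (ai.2.length > 1)) = true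
  · rw [if_pos hg]
    rcases hm : msdD.get? ai.1 with _ | d
    · rfl
    · exact pairfold_contains t ai.1 d _ w (by simp only [Bool.and_eq_true] at hg; exact hg.1) x
  · rw [if_neg hg]

theorem itemStep_keys (msdD : PySem.Dict String Int) (t : List String)
    (w : PySem.Dict String (PySem.Set String)) (ai : String × List Int) :
    (bItemStep msdD t w ai).keys = w.keys := by
  unfold bItemStep
  by_cases hg : (w.contains ai.1 && decide (ai.2.length > 1)) = true
  · rw [if_pos hg]
    rcases hm : msdD.get? ai.1 with _ | d
    · rfl
    · exact pairfold_keys t ai.1 d _ w (by simp only [Bool.and_eq_true] at hg; exact hg.1)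
  · rw [if_neg hg]

theorem itemStep_getD_ne (msdD : PySem.Dict String Int) (t : List String)
    (w : PySem.Dict String (PySem.Set String)) (ai : String × List Int) (x : String)
    (hx : x ≠ ai.1) : (bItemStep msdD t w ai).getD x [] = w.getD x [] := by
  unfold bItemStep
  by_cases hg : (w.contains ai.1 && decide (ai.2.length > 1)) = true
  · rw [if_pos hg]
    rcases hm : msdD.get? ai.1 with _ | d
    · rfl
    · exact pairfold_getD_ne t ai.1 x d hx _ w
  · rw [if_neg hg]

theorem symfold_getD_notmem (msdD : PySem.Dict String Int) (t : List String) (a : String) :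
    ∀ (l : List String), a ∉ l →
    ∀ (w : PySem.Dict String (PySem.Set String)),
    (l.foldl (fun w x => bItemStep msdD t w (x, idxI x t)) w).getD a [] = w.getD a [] := by
  intro l
  induction l with
  | nil => intro _ w; rfl
  | cons x xs ih =>
    intro hal w
    simp only [List.foldl_cons]
    rw [ih (fun h => hal (List.mem_cons_of_mem _ h)),
      itemStep_getD_ne msdD t w (x, idxI x t) a (fun h => hal (by rw [h]; exact List.mem_cons_self))]

theorem symfold_getD (msdD : PySem.Dict String Int) (t : List String) (a : String) :
    ∀ (l : List String), l.Nodup →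
    ∀ (w : PySem.Dict String (PySem.Set String)),
    (l.foldl (fun w x => bItemStep msdD t w (x, idxI x t)) w).getD a [] =
      if a ∈ l then bVal msdD a t (w.contains a) (w.getD a []) else w.getD a [] := by
  intro l
  induction l with
  | nil => intro _ w; simp
  | cons x xs ih =>
    intro hnd w
    simp only [List.foldl_cons]
    by_cases hax : a = x
    · subst hax
      rw [symfold_getD_notmem msdD t a xs (List.nodup_cons.mp hnd).1, if_pos List.mem_cons_self]
      unfold bItemStep bVal
      by_cases hg : (w.contains a && decide ((idxI a t).length > 1)) = true
      · rw [if_pos hg, if_pos hg]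
        rcases hm : msdD.get? a with _ | d
        · rfl
        · rw [pairfold_getD, PySem.List.slice_from_one]
          rfl
      · rw [if_neg hg, if_neg hg]
    · rw [ih (List.nodup_cons.mp hnd).2,
        itemStep_contains msdD t w (x, idxI x t) a,
        itemStep_getD_ne msdD t w (x, idxI x t) a hax]
      by_cases hm : a ∈ xs
      · rw [if_pos hm, if_pos (List.mem_cons_of_mem _ hm)]
      · rw [if_neg hm, if_neg (by simp [hax, hm])]

theorem btrace_getD (msdD : PySem.Dict String Int) (t : List String) (a : String)
    (w : PySem.Dict String (PySem.Set String)) :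
    (bTraceStep msdD w t).getD a [] = bTrace msdD a (w.contains a) (w.getD a []) t := by
  unfold bTraceStep bTrace
  rw [pos_items, List.foldl_map,
    symfold_getD msdD t a (PySem.Set.ofList t) (PySem.Set.nodup_ofList t) w]
  by_cases hm : a ∈ t
  · rw [if_pos ((PySem.Set.mem_ofList t a).mpr hm), if_pos hm]
  · rw [if_neg (fun h => hm ((PySem.Set.mem_ofList t a).mp h)), if_neg hm]

theorem btrace_contains (msdD : PySem.Dict String Int) (t : List String)
    (w : PySem.Dict String (PySem.Set String)) (x : String) :
    (bTraceStep msdD w t).contains x = w.contains x := by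
  unfold bTraceStep
  generalize (bPos t).items = l
  induction l generalizing w with
  | nil => rfl
  | cons ai l ih => rw [List.foldl_cons, ih, itemStep_contains]

theorem btrace_keys (msdD : PySem.Dict String Int) (t : List String)
    (w : PySem.Dict String (PySem.Set String)) :
    (bTraceStep msdD w t).keys = w.keys := by
  unfold bTraceStep
  generalize (bPos t).items = l
  induction l generalizing w with
  | nil => rfl
  | cons ai l ih => rw [List.foldl_cons, ih, itemStep_keys]

theorem clfold_getD (msdD : PySem.Dict String Int) (a : String) :
    ∀ (cl : List (List String)) (w : PySem.Dict String (PySem.Set String)),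
    (cl.foldl (bTraceStep msdD) w).getD a [] =
      cl.foldl (fun s t => bTrace msdD a (w.contains a) s t) (w.getD a []) := by
  intro cl
  induction cl with
  | nil => intro w; rfl
  | cons t cl ih =>
    intro w
    simp only [List.foldl_cons]
    rw [ih, btrace_getD, btrace_contains]

theorem msdw_alt_eq (cl : List (List String)) (msd : List (String × Int)) :
    msdw_alt cl msd = (keyList (PySem.Dict.ofList msd) cl).map (fun a =>
      (a, cl.foldl (fun s t => bTrace (PySem.Dict.ofList msd) a true s t) PySem.Set.empty)) := by
  have hclkeys : ∀ (cl' : List (List String)) (w : PySem.Dict String (PySem.Set String)),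
      (cl'.foldl (bTraceStep (PySem.Dict.ofList msd)) w).keys = w.keys := by
    intro cl'
    induction cl' with
    | nil => intro w; rfl
    | cons t cl' ih => intro w; rw [List.foldl_cons, ih, btrace_keys]
  unfold msdw_alt
  set msdD := PySem.Dict.ofList msd with hmsdD
  set init := cl.foldl (fun w t => t.foldl (bKeyStep msdD) w) PySem.Dict.empty with hinit
  have hik := init_keys msdD cl
  have hkeys : (cl.foldl (bTraceStep msdD) init).keys = keyList msdD cl := by
    rw [hclkeys, hik]
  have hnd : (cl.foldl (bTraceStep msdD) init).keys.Nodup := by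
    rw [hkeys]; exact (PySem.Set.nodup_ofList _).filter _
  rw [PySem.Dict.items_eq_map_keys _ hnd ([] : List String), hkeys]
  apply List.map_congr_left
  intro a ha
  have hcont : init.contains a = true := by
    rw [dict_contains_iff, hik]
    simpa [List.contains_iff_mem] using ha
  have hgd : init.getD a [] = [] := by
    have hitems : init.items = (keyList msdD cl).map (fun a => (a, ([] : List String))) :=
      init_items msdD cl
    have h0 : init.getD a [] = (PySem.Dict.mk ((keyList msdD cl).map
        (fun a => (a, ([] : List String))))).getD a [] := by
      simp only [PySem.Dict.getD, PySem.Dict.get?, hitems]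
    rw [h0, getD_of_items_map _ _ a ha ((PySem.Set.nodup_ofList _).filter _)]
  congr 1
  rw [clfold_getD msdD a cl init, hcont, hgd]
  rfl

-- ---------- per-trace value equality ----------
theorem idx_len (a : String) (t : List String) :
    (idxI a t).length = (t.filter (fun e => e == a)).length := by
  unfold idxI
  rw [List.length_map]
  have gen : ∀ (s : Int), ((PySem.List.enumerate t s).filter (fun p => p.2 == a)).length
      = (t.filter (fun e => e == a)).length := by
    induction t with
    | nil => intro s; rfl
    | cons x xs ih =>
      intro s
      rw [PySem.List.enumerate_cons]
      simp only [List.filter_cons]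
      cases hb : (x == a)
      · simpa using ih (s + 1)
      · simpa using ih (s + 1)
  exact gen 0

theorem mem_of_two (a : String) (t : List String)
    (h : 1 < (t.filter (fun e => e == a)).length) : a ∈ t := by
  rcases hf : t.filter (fun e => e == a) with _ | ⟨p, rest⟩
  · rw [hf] at h; simp at h
  · have hp : p ∈ t.filter (fun e => e == a) := by rw [hf]; exact List.mem_cons_self
    have hm := List.mem_filter.mp hp
    have hpa : p = a := by simpa using hm.2
    exact hpa ▸ hm.1

theorem range_zip (P : List Int) (F : PySem.Set String → Int → Int → PySem.Set String)
    (s : PySem.Set String) :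
    (PySem.List.pyRange 0 ((P.length : Int) - 1) 1).foldl
        (fun s i => F s (PySem.List.pyGetD P i 0) (PySem.List.pyGetD P (i + 1) 0)) s =
      (P.zip P.tail).foldl (fun s ij => F s ij.1 ij.2) s := by
  cases P with
  | nil =>
    rw [PySem.List.pyRange_one_eq_nil (by norm_num)]
    rfl
  | cons p ps =>
    have hlen : ((p :: ps).length : Int) - 1 = ((ps.length : Nat) : Int) := by
      simp
    rw [hlen, PySem.List.pyRange_zero_natCast, List.foldl_map]
    have hcast : ∀ k : Nat, ((k : Int) + 1) = (((k + 1 : Nat) : Int)) := by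
      intro k; push_cast; ring
    simp only [hcast, PySem.List.pyGetD_natCast]
    have hmap : (List.range ps.length).map
        (fun k => ((p :: ps).getD k 0, (p :: ps).getD (k + 1) 0)) = (p :: ps).zip (p :: ps).tail := by
      apply List.ext_getElem
      · simp [List.length_zip]
      · intro i h1 h2
        simp only [List.getElem_map, List.getElem_range, List.getElem_zip, List.getElem_tail]
        have hi1 : i < (p :: ps).length := by simp at h1 ⊢; omega
        have hi2 : i + 1 < (p :: ps).length := by simp at h1 ⊢; omega
        rw [List.getD_eq_getElem _ _ hi1, List.getD_eq_getElem _ _ hi2]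
    rw [← hmap, List.foldl_map]

theorem trace_eq (msdD : PySem.Dict String Int) (a : String) (d : Int)
    (hg : msdD.get? a = some d) (s : PySem.Set String) (t : List String) :
    aTrace a (msdD.getD a 0) s t = bTrace msdD a true s t := by
  have hgd : msdD.getD a 0 = d := by simp [PySem.Dict.getD, hg]
  unfold aTrace bTrace bVal
  by_cases h2 : (t.filter (fun e => e == a)).length > 1
  · have hmem : a ∈ t := mem_of_two a t h2
    have hlen : decide ((idxI a t).length > 1) = true := by
      rw [idx_len]; simpa using h2
    rw [if_pos h2, if_pos hmem, hgd]
    simp only [Bool.true_and, hlen, if_true, hg]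
    unfold gapFold
    rw [← range_zip (idxI a t)
      (fun s i j => if j - i - 1 == d then
        PySem.Set.update s (PySem.List.slice t (some (i + 1)) (some j)) else s) s]
    rfl
  · rw [if_neg h2]
    have hlen : decide ((idxI a t).length > 1) = false := by
      rw [idx_len]; simpa using h2
    by_cases hmem : a ∈ t
    · rw [if_pos hmem]
      simp [hlen]
    · rw [if_neg hmem]

-- ===== VERDICT (by name: the statement is the Claim_ definition above) =====
theorem msdw_spec : Claim_equal_msdw := by
  intro cl msd _
  unfold Spec_msdw
  rw [msdw_eq, msdw_alt_eq]
  apply List.map_congr_left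
  intro a ha
  have hc : mCond (PySem.Dict.ofList msd) a = true := (List.mem_filter.mp ha).2
  unfold mCond at hc
  rcases hgo : (PySem.Dict.ofList msd).get? a with _ | d
  · rw [hgo] at hc; simp at hc
  · have : ∀ (s : PySem.Set String) (t : List String),
        aTrace a ((PySem.Dict.ofList msd).getD a 0) s t = bTrace (PySem.Dict.ofList msd) a true s t :=
      fun s t => trace_eq _ a d hgo s t
    simp only [this]
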